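-- pv_equiv track=rewrite | github.com/ccheever/CoreNode | Tools/js2c.py | ToNSStringArray
-- ===== SOURCE A (Python) =====
-- def ToNSStringArray(sources):
--   nsstrings = []
--   replacements = [('\\', r'\\'), ('"', r'\"'), ('\n', r'\n')]
--   for source in sources:
--     for replacement in replacements:
--       source = source.replace(*replacement)
--     nsstrings.append('@"' + source + '"')
--   return '\n  ' + ',\n  '.join(nsstrings) + '\n'
-- ===== SOURCE B (Python) =====
-- def ToNSStringArray(sources):
--   esc = {'\\': '\\\\', '"': '\\"', '\n': '\\n'}
--   nsstrings = ['@"' + ''.join(esc.get(c, c) for c in source) + '"' for source in sources]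
--   return '\n  ' + ',\n  '.join(nsstrings) + '\n'
-- ===== Notes on version B (the rewrite author's own statement) =====
-- stated objective: simpler
-- what changed: Replaced the three sequential whole-string .replace passes with a single character-by-character scan that maps each char through an escape dict ('\'->'\\', '"'->'\"', '\n'->'\n', default the char itself) and joins the results; the outer wrapping and join are unchanged.
import Mathlib
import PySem

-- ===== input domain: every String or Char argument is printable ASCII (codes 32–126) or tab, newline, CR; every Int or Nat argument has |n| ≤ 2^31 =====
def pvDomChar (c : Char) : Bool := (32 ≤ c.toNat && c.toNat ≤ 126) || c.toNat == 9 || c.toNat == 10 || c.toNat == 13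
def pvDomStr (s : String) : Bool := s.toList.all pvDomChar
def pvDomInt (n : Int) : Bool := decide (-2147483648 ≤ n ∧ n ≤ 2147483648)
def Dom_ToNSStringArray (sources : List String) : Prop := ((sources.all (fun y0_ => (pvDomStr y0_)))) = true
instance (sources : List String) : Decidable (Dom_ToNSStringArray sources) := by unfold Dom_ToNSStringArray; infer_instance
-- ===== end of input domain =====

-- B replaces A's three sequential whole-string replace passes with a single per-character
-- scan through an escape dict; same output, one pass instead of three (objective: simpler).

-- ===== PORT A =====
def ToNSStringArray (sources : List String) : String :=
  let replacements : List (String × String) := [("\\", "\\\\"), ("\"", "\\\""), ("\n", "\\n")]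
  let nsstrings : List String := sources.foldl (fun acc source =>
    let source := replacements.foldl (fun s r => PySem.Str.replace s r.1 r.2) source
    acc ++ ["@\"" ++ source ++ "\""]) []
  "\n  " ++ PySem.Str.join ",\n  " nsstrings ++ "\n"

-- ===== PORT B =====
def pvEscDict : PySem.Dict Char String :=
  PySem.Dict.mk [('\\', "\\\\"), ('"', "\\\""), ('\n', "\\n")]

def ToNSStringArray_alt (sources : List String) : String :=
  let nsstrings : List String := sources.map (fun source =>
    "@\"" ++ PySem.Str.join "" (source.toList.map (fun c => PySem.Dict.getD pvEscDict c (String.ofList [c]))) ++ "\"")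
  "\n  " ++ PySem.Str.join ",\n  " nsstrings ++ "\n"

-- ===== PRECONDITION & SPEC =====
def Spec_ToNSStringArray (sources : List String) (out : String) : Prop := out = ToNSStringArray_alt sources
instance (sources : List String) (out : String) : Decidable (Spec_ToNSStringArray sources out) := by unfold Spec_ToNSStringArray; infer_instance

-- ===== CLAIM (what is proved, stated in full; the proofs are below) =====
def Claim_equal_ToNSStringArray : Prop := ∀ (sources : List String), Dom_ToNSStringArray sources → Spec_ToNSStringArray sources (ToNSStringArray sources)

-- ===== LEMMAS AND PROOFS =====

-- replace.go with a single-char pattern is the obvious flatMap, given enough fuel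
theorem pv_go_single (o : Char) (new : List Char) :
    ∀ (l : List Char) (fuel : Nat) (acc : List Char), l.length ≤ fuel →
      PySem.Chars.replace.go [o] new fuel l acc
        = acc.reverse ++ l.flatMap (fun c => if c = o then new else [c]) := by
  intro l
  induction l with
  | nil => intro fuel acc h; cases fuel <;> simp [PySem.Chars.replace.go]
  | cons c t ih =>
    intro fuel acc h
    cases fuel with
    | zero => simp at h
    | succ fuel =>
      have ht : t.length ≤ fuel := by simpa using h
      by_cases hc : c = o
      · simp [PySem.Chars.replace.go, List.isPrefixOf, hc, ih fuel _ ht]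
      · have hbeq : (o == c) = false := by simp; exact fun h' => hc h'.symm
        simp [PySem.Chars.replace.go, List.isPrefixOf, hbeq, hc, ih fuel _ ht]

theorem pv_replace_single (o : Char) (new : List Char) (l : List Char) :
    PySem.Chars.replace l [o] new = l.flatMap (fun c => if c = o then new else [c]) := by
  simp [PySem.Chars.replace, pv_go_single o new l l.length [] le_rfl]

theorem pv_join_nil (l : List (List Char)) : PySem.Chars.join [] l = l.flatten := by
  induction l with
  | nil => simp [PySem.Chars.join, List.intercalate]
  | cons x xs ih =>
    cases xs <;> simp_all [PySem.Chars.join, List.intercalate, List.intersperse]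

-- the three chained replaces equal B's single per-character escape, per string
theorem pv_escape_eq (s : String) :
    PySem.Str.replace (PySem.Str.replace (PySem.Str.replace s "\\" "\\\\") "\"" "\\\"") "\n" "\\n"
      = PySem.Str.join "" (s.toList.map (fun c => PySem.Dict.getD pvEscDict c (String.ofList [c]))) := by
  apply String.toList_inj.mp
  simp only [PySem.Str.toList_replace, PySem.Str.toList_join]
  have h1 : ("\\" : String).toList = ['\\'] := by decide
  have h2 : ("\"" : String).toList = ['"'] := by decide
  have h3 : ("\n" : String).toList = ['\n'] := by decide
  have h4 : ("" : String).toList = [] := by decide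
  rw [h1, h2, h3, h4, pv_replace_single, pv_replace_single, pv_replace_single,
    List.flatMap_assoc, List.flatMap_assoc, pv_join_nil, List.map_map,
    List.flatten_eq_flatMap, List.flatMap_map]
  apply List.flatMap_congr
  intro c _
  by_cases hb : c = '\\'
  · subst hb; decide
  · by_cases hq : c = '"'
    · subst hq; decide
    · by_cases hn : c = '\n'
      · subst hn; decide
      · simp [hb, hq, hn, PySem.Dict.getD, PySem.Dict.get?, pvEscDict,
          (by simp; exact fun h => hb h.symm : ('\\' == c) = false),
          (by simp; exact fun h => hq h.symm : ('"' == c) = false),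
          (by simp; exact fun h => hn h.symm : ('\n' == c) = false)]

-- ===== VERDICT (by name: the statement is the Claim_ definition above) =====
theorem ToNSStringArray_spec : Claim_equal_ToNSStringArray := by
  intro sources _
  show ToNSStringArray sources = ToNSStringArray_alt sources
  unfold ToNSStringArray ToNSStringArray_alt
  simp only [PySem.List.foldl_append_singleton_eq_map, List.nil_append]
  have h : sources.map (fun source =>
      "@\"" ++ [(("\\" : String), ("\\\\" : String)), ("\"", "\\\""), ("\n", "\\n")].foldl
        (fun s r => PySem.Str.replace s r.1 r.2) source ++ "\"")
    = sources.map (fun source =>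
      "@\"" ++ PySem.Str.join "" (source.toList.map (fun c => PySem.Dict.getD pvEscDict c (String.ofList [c]))) ++ "\"") := by
    apply List.map_congr_left
    intro s _
    simp only [List.foldl_cons, List.foldl_nil]
    rw [pv_escape_eq]
  rw [h]
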